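-- pv_equiv track=rewrite | github.com/sunminky/algorythmStudy | 알고리즘 스터디/개인공부/Bitmask/LightOff14927.py | check
-- ===== SOURCE A (Python) =====
-- def toggle(x, y, width, field):
--     movement = ((0, 0), (1, 0), (-1, 0), (0, 1), (0, -1))
--
--     for move in movement:
--         new_x = x + move[0]
--         new_y = y + move[1]
--
--         # 바운더리
--         if 0 <= new_x < width and 0 <= new_y < width:
--             field[new_y][new_x] = not field[new_y][new_x]
--
-- def check(case, width, field) -> int:
--     new_field = [field[seq][:] for seq in range(width)]
--     cnt = 0
--
--     # 첫번째 줄 토글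
--     for i in range(width):
--         if case & (1 << i):
--             toggle(i, 0, width, new_field)
--             cnt += 1
--
--     # 2 ~ 마지막 줄 까지 토글
--     for row in range(1, width):
--         for col in range(width):
--             if new_field[row - 1][col]:
--                 toggle(col, row, width, new_field)
--                 cnt += 1
--
--     return 401 if any(new_field[-1]) else cnt
-- ===== SOURCE B (Python) =====
-- def check(case, width, field) -> int:
--     # Row-sweep batch simulation: carry two boolean vectors (this row's pending
--     # toggles and the flips arriving from the row above) and apply them to each
--     # row in one pass, instead of mutating a copied grid cell-by-cell through a
--     # 5-neighbour toggle helper.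
--     cnt = 0
--     t = [bool(case & (1 << i)) for i in range(width)]   # toggles for row 0
--     carry = [False] * width                             # flips from the row above
--     for r in range(width):
--         cnt += sum(t)
--         cur = list(field[r])
--         for i in range(width):
--             if carry[i] ^ t[i] ^ (i > 0 and t[i - 1]) ^ (i + 1 < width and t[i + 1]):
--                 cur[i] = not cur[i]
--         carry = t
--         t = [cur[i] for i in range(width)]   # lit cells drive the next row
--     return 401 if any(cur) else cnt
-- ===== Notes on version B (the rewrite author's own statement) =====
-- stated objective: alternative
-- what changed: A copies the grid and mutates it cell-by-cell through a 5-neighbour toggle helper inside nested propagation loops; B never builds a grid: it sweeps the rows once, carrying two boolean vectors (this row's pending toggles and the flips arriving from the row above) and applying each row's net flips in one batch XOR pass. Pre_ excludes boards where one of the first width rows is shorter than width: there A usually raises IndexError but can return a value when no toggle reaches the missing cells, while B always reads width cells of each row and raises.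
-- outside the precondition, e.g. on check(0, 2, [[False, False], [False]]): A returns 0, B raises IndexError; on check(0, 1, [[]]): A returns 0, B raises IndexError
import Mathlib
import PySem

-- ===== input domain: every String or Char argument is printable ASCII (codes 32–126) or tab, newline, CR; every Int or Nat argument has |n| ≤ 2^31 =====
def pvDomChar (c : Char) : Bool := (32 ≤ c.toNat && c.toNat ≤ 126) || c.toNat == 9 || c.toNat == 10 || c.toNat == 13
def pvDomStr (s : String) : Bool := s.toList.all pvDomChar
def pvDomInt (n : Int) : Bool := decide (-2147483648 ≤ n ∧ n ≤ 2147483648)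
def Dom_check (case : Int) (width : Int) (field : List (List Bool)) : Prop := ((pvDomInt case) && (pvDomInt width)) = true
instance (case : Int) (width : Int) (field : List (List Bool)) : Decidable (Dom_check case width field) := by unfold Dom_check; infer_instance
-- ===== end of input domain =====

-- B replaces A's copied mutable grid and its cell-by-cell 5-neighbour toggle
-- helper by a single row sweep carrying two boolean vectors (pending toggles and
-- the flips arriving from the row above), applied per row in one batch XOR pass
-- (objective: alternative decomposition, same asymptotics).

-- ===== PORT A =====
-- the five (dx, dy) moves of `toggle`

def toggleMoves : List (Int × Int) := [(0, 0), (1, 0), (-1, 0), (0, 1), (0, -1)]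

-- field[new_y][new_x] = not field[new_y][new_x] for each in-bounds neighbour

def toggle (x y width : Int) (field : List (List Bool)) : List (List Bool) :=
  toggleMoves.foldl (fun f mv =>
    let nx := x + mv.1
    let ny := y + mv.2
    if 0 ≤ nx ∧ nx < width ∧ 0 ≤ ny ∧ ny < width then
      f.set ny.toNat ((f.getD ny.toNat []).set nx.toNat (!((f.getD ny.toNat []).getD nx.toNat false)))
    else f) field

def check (case : Int) (width : Int) (field : List (List Bool)) : Int :=
  let new_field := (PySem.List.pyRange 0 width 1).map
      (fun seq => PySem.List.slice (PySem.List.pyGetD field seq []) none none)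
  let st1 := (PySem.List.pyRange 0 width 1).foldl
      (fun (st : List (List Bool) × Int) i =>
        if PySem.Int.band case (1 <<< i.toNat) ≠ 0 then (toggle i 0 width st.1, st.2 + 1) else st)
      (new_field, 0)
  let st2 := (PySem.List.pyRange 1 width 1).foldl
      (fun st row =>
        (PySem.List.pyRange 0 width 1).foldl
          (fun (st : List (List Bool) × Int) col =>
            if PySem.List.pyGetD (PySem.List.pyGetD st.1 (row - 1) []) col false then
              (toggle col row width st.1, st.2 + 1)
            else st)
          st)
      st1
  if (PySem.List.pyGetD st2.1 (-1) []).any id then 401 else st2.2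

-- ===== PORT B =====

def check_alt (case : Int) (width : Int) (field : List (List Bool)) : Int :=
  let t0 := (PySem.List.pyRange 0 width 1).map
      (fun i => PySem.Int.band case (1 <<< i.toNat) != 0)
  let carry0 := List.replicate width.toNat false
  let st := (PySem.List.pyRange 0 width 1).foldl
      (fun (st : Int × List Bool × List Bool × List Bool) r =>
        let cnt := st.1 + (st.2.1.count true : Int)
        let cur0 := PySem.List.pyGetD field r []
        let cur := (PySem.List.pyRange 0 width 1).foldl
            (fun cur i =>
              if xor (xor (xor (PySem.List.pyGetD st.2.2.1 i false)
                    (PySem.List.pyGetD st.2.1 i false))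
                  (decide (0 < i) && PySem.List.pyGetD st.2.1 (i - 1) false))
                (decide (i + 1 < width) && PySem.List.pyGetD st.2.1 (i + 1) false)
              then PySem.List.pySetD cur i (!(PySem.List.pyGetD cur i false)) else cur)
            cur0
        let t := (PySem.List.pyRange 0 width 1).map
            (fun i => PySem.List.pyGetD cur i false)
        (cnt, t, st.2.1, cur))
      (0, t0, carry0, ([] : List Bool))
      -- the [] seeds `cur`, which Python leaves unbound before the loop; under
      -- Pre_ (1 ≤ width) the loop always overwrites it before it is read
  if st.2.2.2.any id then 401 else st.1

-- ===== PRECONDITION & SPEC =====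
-- Pre_ excludes boards where width < 1, the board has fewer than `width` rows,
-- or one of the first `width` rows is shorter than `width`: there A usually
-- raises IndexError but can return a value when no toggle reaches the missing
-- cells, while B always reads `width` cells of each row and raises.

def Pre_check (case : Int) (width : Int) (field : List (List Bool)) : Prop :=
  1 ≤ width ∧ width ≤ (field.length : Int) ∧
    ∀ row ∈ field.take width.toNat, width ≤ (row.length : Int)

instance (case : Int) (width : Int) (field : List (List Bool)) : Decidable (Pre_check case width field) := by unfold Pre_check; infer_instance

def pvWitness_check : Int × Int × List (List Bool) :=
  (5, 3, [[true, false, true], [false, false, false], [true, true, false]])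

def Spec_check (case : Int) (width : Int) (field : List (List Bool)) (out : Int) : Prop := out = check_alt case width field
instance (case : Int) (width : Int) (field : List (List Bool)) (out : Int) : Decidable (Spec_check case width field out) := by unfold Spec_check; infer_instance

-- ===== CLAIM (what is proved, stated in full; the proofs are below) =====
def Claim_equal_check : Prop := ∀ (case : Int) (width : Int) (field : List (List Bool)), Dom_check case width field → Pre_check case width field → Spec_check case width field (check case width field)

-- ===== LEMMAS AND PROOFS =====

def cell (g : List (List Bool)) (j i : Nat) : Bool := (g.getD j []).getD i false

def Shape (g : List (List Bool)) (W : Nat) (L : Nat → Nat) : Prop := g.length = W ∧ ∀ j < W, (g.getD j []).length = L j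

lemma getD_set_row (l : List Bool) (i j : Nat) (a : Bool) :
    (l.set i a).getD j false = if i = j ∧ i < l.length then a else l.getD j false := by
  simp only [List.getD_eq_getElem?_getD, List.getElem?_set]
  split_ifs <;> simp_all <;> omega

lemma getD_set_grid (l : List (List Bool)) (i j : Nat) (a : List Bool) :
    (l.set i a).getD j [] = if i = j ∧ i < l.length then a else l.getD j [] := by
  simp only [List.getD_eq_getElem?_getD, List.getElem?_set]
  split_ifs <;> simp_all <;> omega

-- one grid update step of `toggle`, as used in its foldl body

def flip1 (g : List (List Bool)) (y x : Nat) : List (List Bool) :=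
  g.set y ((g.getD y []).set x (!((g.getD y []).getD x false)))

lemma shape_flip1 (g : List (List Bool)) (W : Nat) (L : Nat → Nat) (y x : Nat) (hg : Shape g W L) : Shape (flip1 g y x) W L := by
  obtain ⟨h1, h2⟩ := hg
  refine ⟨by simp [flip1, h1], fun j hj => ?_⟩
  rw [flip1, getD_set_grid]
  split_ifs with h
  · rw [List.length_set]; exact h.1 ▸ h2 j hj
  · exact h2 j hj

lemma cell_flip1 (g : List (List Bool)) (W : Nat) (L : Nat → Nat) (y x j i : Nat) (hg : Shape g W L)
    (hL : W ≤ L y) (hy : y < W) (hx : x < W) :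
    cell (flip1 g y x) j i = if y = j ∧ x = i then !cell g y x else cell g j i := by
  obtain ⟨h1, h2⟩ := hg
  rw [cell, flip1, getD_set_grid]
  split_ifs with h h3 h4
  · rw [getD_set_row, h2 y hy]
    have hLy : x < L y := by omega
    rcases h3 with ⟨hyj, hxi⟩
    subst hyj
    subst hxi
    simp [cell, hLy]
  · rw [getD_set_row, h2 y hy]
    rcases Decidable.em (x = i) with he | he
    · exact absurd ⟨h.1, he⟩ h3
    · simp [he, cell, h.1]
  · exact absurd ⟨h4.1, h1 ▸ hy⟩ h
  · rfl

def flips (g : List (List Bool)) (ps : List (Nat × Nat)) : List (List Bool) :=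
  ps.foldl (fun h p => flip1 h p.1 p.2) g

lemma shape_flips (W : Nat) (L : Nat → Nat) (ps : List (Nat × Nat)) (g : List (List Bool)) (hg : Shape g W L) :
    Shape (flips g ps) W L := by
  induction ps generalizing g with
  | nil => exact hg
  | cons p ps ih => exact ih _ (shape_flip1 _ _ _ _ _ hg)

lemma cell_flips (W : Nat) (L : Nat → Nat) (ps : List (Nat × Nat)) (g : List (List Bool)) (j i : Nat)
    (hg : Shape g W L) (hLa : ∀ y < W, W ≤ L y)
    (hps : ∀ p ∈ ps, p.1 < W ∧ p.2 < W) (hnd : ps.Nodup) :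
    cell (flips g ps) j i = xor (cell g j i) (decide ((j, i) ∈ ps)) := by
  induction ps generalizing g with
  | nil => simp [flips]
  | cons p ps ih =>
    have hp := hps p (by simp)
    have h1 : cell (flips (flip1 g p.1 p.2) ps) j i
        = xor (cell (flip1 g p.1 p.2) j i) (decide ((j, i) ∈ ps)) :=
      ih (flip1 g p.1 p.2) (shape_flip1 _ _ _ _ _ hg) (fun q hq => hps q (by simp [hq]))
        hnd.of_cons
    have hstep : flips g (p :: ps) = flips (flip1 g p.1 p.2) ps := rfl
    rw [hstep, h1, cell_flip1 g W L p.1 p.2 j i hg (hLa p.1 hp.1) hp.1 hp.2]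
    by_cases hpe : p = (j, i)
    · have hnm : (j, i) ∉ ps := hpe ▸ (List.nodup_cons.mp hnd).1
      subst hpe
      simp [hnm]
    · have hne : ¬ (p.1 = j ∧ p.2 = i) := by
        intro h; exact hpe (Prod.ext_iff.mpr ⟨h.1, h.2⟩)
      have hpe' : ¬ ((j, i) = p) := fun h => hpe h.symm
      simp only [if_neg hne]
      by_cases hm : (j, i) ∈ ps
      · simp [hm, hpe']
      · simp [hm, hpe']

-- the positions `toggle x y width` flips, for an in-range (x, y)

def toggPos (W x y : Nat) : List (Nat × Nat) :=
  [(y, x)] ++ (if x + 1 < W then [(y, x + 1)] else [])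
    ++ (if 0 < x then [(y, x - 1)] else [])
    ++ (if y + 1 < W then [(y + 1, x)] else [])
    ++ (if 0 < y then [(y - 1, x)] else [])

def hitC (W x y j i : Nat) : Prop :=
  (j = y ∧ (i = x ∨ i = x + 1 ∨ i + 1 = x)) ∨ (i = x ∧ (j = y + 1 ∨ j + 1 = y))

def hitB (W x y j i : Nat) : Bool :=
  decide ((j = y ∧ (i = x ∨ i = x + 1 ∨ i + 1 = x)) ∨ (i = x ∧ (j = y + 1 ∨ j + 1 = y)))

lemma mem_toggPos (W x y j i : Nat) (hx : x < W) (hy : y < W) (hj : j < W) (hi : i < W) :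
    (j, i) ∈ toggPos W x y ↔ hitC W x y j i := by
  unfold toggPos hitC
  split_ifs <;> simp [Prod.ext_iff] <;> omega

lemma nodup_toggPos (W x y : Nat) : (toggPos W x y).Nodup := by
  unfold toggPos
  split_ifs <;> simp [Prod.ext_iff] <;> omega

lemma bounds_toggPos (W x y : Nat) (hx : x < W) (hy : y < W) :
    ∀ p ∈ toggPos W x y, p.1 < W ∧ p.2 < W := by
  unfold toggPos
  split_ifs <;> simp <;> omega

def tbody (x y width : Int) (f : List (List Bool)) (mv : Int × Int) : List (List Bool) :=
  let nx := x + mv.1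
  let ny := y + mv.2
  if 0 ≤ nx ∧ nx < width ∧ 0 ≤ ny ∧ ny < width then
    f.set ny.toNat ((f.getD ny.toNat []).set nx.toNat (!((f.getD ny.toNat []).getD nx.toNat false)))
  else f

lemma tb00 (x y W : Nat) (g : List (List Bool)) (hx : x < W) (hy : y < W) :
    tbody (x:Int) (y:Int) (W:Int) g (0, 0) = flip1 g y x := by
  unfold tbody flip1
  rw [if_pos (by constructor <;> [omega; (constructor <;> [omega; (constructor <;> omega)])])]
  norm_num

lemma tb10_pos (x y W : Nat) (g : List (List Bool)) (h : x + 1 < W) (hy : y < W) :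
    tbody (x:Int) (y:Int) (W:Int) g (1, 0) = flip1 g y (x+1) := by
  unfold tbody flip1
  rw [if_pos (by constructor <;> [omega; (constructor <;> [omega; (constructor <;> omega)])])]
  have e : ((x:Int) + 1).toNat = x + 1 := by omega
  norm_num [e]

lemma tb10_neg (x y W : Nat) (g : List (List Bool)) (h : ¬ x + 1 < W) :
    tbody (x:Int) (y:Int) (W:Int) g (1, 0) = g := by
  unfold tbody
  rw [if_neg (by omega)]

lemma tbm0_pos (x y W : Nat) (g : List (List Bool)) (h : 0 < x) (hx : x < W) (hy : y < W) :
    tbody (x:Int) (y:Int) (W:Int) g (-1, 0) = flip1 g y (x-1) := by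
  unfold tbody flip1
  rw [if_pos (by constructor <;> [omega; (constructor <;> [omega; (constructor <;> omega)])])]
  have e : ((x:Int) + -1).toNat = x - 1 := by omega
  norm_num [e]

lemma tbm0_neg (x y W : Nat) (g : List (List Bool)) (h : ¬ 0 < x) :
    tbody (x:Int) (y:Int) (W:Int) g (-1, 0) = g := by
  unfold tbody
  rw [if_neg (by omega)]

lemma tb01_pos (x y W : Nat) (g : List (List Bool)) (hx : x < W) (h : y + 1 < W) :
    tbody (x:Int) (y:Int) (W:Int) g (0, 1) = flip1 g (y+1) x := by
  unfold tbody flip1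
  rw [if_pos (by constructor <;> [omega; (constructor <;> [omega; (constructor <;> omega)])])]
  have e : ((y:Int) + 1).toNat = y + 1 := by omega
  norm_num [e]

lemma tb01_neg (x y W : Nat) (g : List (List Bool)) (h : ¬ y + 1 < W) :
    tbody (x:Int) (y:Int) (W:Int) g (0, 1) = g := by
  unfold tbody
  rw [if_neg (by omega)]

lemma tb0m_pos (x y W : Nat) (g : List (List Bool)) (h : 0 < y) (hx : x < W) (hy : y < W) :
    tbody (x:Int) (y:Int) (W:Int) g (0, -1) = flip1 g (y-1) x := by
  unfold tbody flip1
  rw [if_pos (by constructor <;> [omega; (constructor <;> [omega; (constructor <;> omega)])])]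
  have e : ((y:Int) + -1).toNat = y - 1 := by omega
  norm_num [e]

lemma tb0m_neg (x y W : Nat) (g : List (List Bool)) (h : ¬ 0 < y) :
    tbody (x:Int) (y:Int) (W:Int) g (0, -1) = g := by
  unfold tbody
  rw [if_neg (by omega)]

lemma tb10 (x y W : Nat) (g : List (List Bool)) (hy : y < W) :
    tbody (x:Int) (y:Int) (W:Int) g (1, 0) = if x + 1 < W then flip1 g y (x+1) else g := by
  by_cases h : x + 1 < W
  · rw [if_pos h, tb10_pos x y W g h hy]
  · rw [if_neg h, tb10_neg x y W g h]

lemma tbm0 (x y W : Nat) (g : List (List Bool)) (hx : x < W) (hy : y < W) :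
    tbody (x:Int) (y:Int) (W:Int) g (-1, 0) = if 0 < x then flip1 g y (x-1) else g := by
  by_cases h : 0 < x
  · rw [if_pos h, tbm0_pos x y W g h hx hy]
  · rw [if_neg h, tbm0_neg x y W g h]

lemma tb01 (x y W : Nat) (g : List (List Bool)) (hx : x < W) :
    tbody (x:Int) (y:Int) (W:Int) g (0, 1) = if y + 1 < W then flip1 g (y+1) x else g := by
  by_cases h : y + 1 < W
  · rw [if_pos h, tb01_pos x y W g hx h]
  · rw [if_neg h, tb01_neg x y W g h]

lemma tb0m (x y W : Nat) (g : List (List Bool)) (hx : x < W) (hy : y < W) :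
    tbody (x:Int) (y:Int) (W:Int) g (0, -1) = if 0 < y then flip1 g (y-1) x else g := by
  by_cases h : 0 < y
  · rw [if_pos h, tb0m_pos x y W g h hx hy]
  · rw [if_neg h, tb0m_neg x y W g h]

lemma toggle_eq_flips (W x y : Nat) (g : List (List Bool)) (hx : x < W) (hy : y < W) :
    toggle (x : Int) (y : Int) (W : Int) g = flips g (toggPos W x y) := by
  have tb : toggle (x : Int) (y : Int) (W : Int) g
      = tbody (x:Int) (y:Int) (W:Int) (tbody (x:Int) (y:Int) (W:Int) (tbody (x:Int) (y:Int) (W:Int)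
          (tbody (x:Int) (y:Int) (W:Int) (tbody (x:Int) (y:Int) (W:Int) g (0,0)) (1,0)) (-1,0)) (0,1)) (0,-1) := rfl
  rw [tb, tb00 x y W g hx hy, tb10 x y W _ hy, tbm0 x y W _ hx hy, tb01 x y W _ hx, tb0m x y W _ hx hy]
  unfold toggPos
  split_ifs <;> simp [flips]

lemma shape_toggle (W : Nat) (L : Nat → Nat) (x y : Nat) (g : List (List Bool)) (hg : Shape g W L) (hx : x < W) (hy : y < W) :
    Shape (toggle (x:Int) (y:Int) (W:Int) g) W L := by
  rw [toggle_eq_flips W x y g hx hy]; exact shape_flips W L _ g hg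

lemma cell_toggle (W : Nat) (L : Nat → Nat) (x y j i : Nat) (g : List (List Bool)) (hg : Shape g W L)
    (hLa : ∀ y < W, W ≤ L y)
    (hx : x < W) (hy : y < W) (hj : j < W) (hi : i < W) :
    cell (toggle (x:Int) (y:Int) (W:Int) g) j i = xor (cell g j i) (hitB W x y j i) := by
  rw [toggle_eq_flips W x y g hx hy,
    cell_flips W L _ g j i hg hLa (bounds_toggPos W x y hx hy) (nodup_toggPos W x y)]
  congr 1
  rw [hitB, decide_eq_decide]
  exact (mem_toggPos W x y j i hx hy hj hi).trans (by rw [hitC])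

lemma cell_toggle_out (W : Nat) (L : Nat → Nat) (x y j i : Nat) (g : List (List Bool)) (hg : Shape g W L)
    (hLa : ∀ y < W, W ≤ L y) (hx : x < W) (hy : y < W) (hout : W ≤ i ∨ W ≤ j) :
    cell (toggle (x:Int) (y:Int) (W:Int) g) j i = cell g j i := by
  rw [toggle_eq_flips W x y g hx hy,
    cell_flips W L _ g j i hg hLa (bounds_toggPos W x y hx hy) (nodup_toggPos W x y)]
  have hnm : (j, i) ∉ toggPos W x y := by
    intro hm
    have := bounds_toggPos W x y hx hy (j, i) hm
    dsimp at this
    omega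
  simp [hnm]

def addSp (W c : Nat) (T : Nat → Bool) (i : Nat) : Bool :=
  xor (xor (decide (c ≤ i ∧ i < W) && T i) (decide (c ≤ i - 1 ∧ 0 < i) && T (i - 1)))
    (decide (c ≤ i + 1 ∧ i + 1 < W) && T (i + 1))

lemma addSp_top (W : Nat) (T : Nat → Bool) (i : Nat) (hi : i < W) : addSp W W T i = false := by
  have d1 : decide (W ≤ i ∧ i < W) = false := by simp only [decide_eq_false_iff_not]; omega
  have d2 : decide (W ≤ i - 1 ∧ 0 < i) = false := by simp only [decide_eq_false_iff_not]; omega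
  have d3 : decide (W ≤ i + 1 ∧ i + 1 < W) = false := by simp only [decide_eq_false_iff_not]; omega
  rw [addSp, d1, d2, d3]
  rfl

lemma addSp_succ (W c : Nat) (T : Nat → Bool) (i : Nat) (hc : c < W) (hi : i < W) :
    addSp W c T i = xor (addSp W (c+1) T i) (decide (i = c ∨ i = c + 1 ∨ i + 1 = c) && T c) := by
  by_cases h1 : i = c
  · have d1 : decide (c ≤ i ∧ i < W) = true := by simp only [decide_eq_true_eq]; omega
    have d1' : decide (c + 1 ≤ i ∧ i < W) = false := by simp only [decide_eq_false_iff_not]; omega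
    have d2 : decide (c ≤ i - 1 ∧ 0 < i) = false := by simp only [decide_eq_false_iff_not]; omega
    have d2' : decide (c + 1 ≤ i - 1 ∧ 0 < i) = false := by simp only [decide_eq_false_iff_not]; omega
    have d3 : decide (c ≤ i + 1 ∧ i + 1 < W) = decide (c + 1 ≤ i + 1 ∧ i + 1 < W) := by
      rw [decide_eq_decide]; omega
    have dr : decide (i = c ∨ i = c + 1 ∨ i + 1 = c) = true := by
      simp only [decide_eq_true_eq]; omega
    have hTT : T i = T c := by rw [h1]
    rw [addSp, addSp, d1, d1', d2, d2', d3, dr, hTT]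
    cases T c <;> cases (decide (c + 1 ≤ i + 1 ∧ i + 1 < W) && T (i + 1)) <;> rfl
  · by_cases h2 : i = c + 1
    · have d1 : decide (c ≤ i ∧ i < W) = decide (c + 1 ≤ i ∧ i < W) := by
        rw [decide_eq_decide]; omega
      have d2 : decide (c ≤ i - 1 ∧ 0 < i) = true := by simp only [decide_eq_true_eq]; omega
      have d2' : decide (c + 1 ≤ i - 1 ∧ 0 < i) = false := by
        simp only [decide_eq_false_iff_not]; omega
      have d3 : decide (c ≤ i + 1 ∧ i + 1 < W) = decide (c + 1 ≤ i + 1 ∧ i + 1 < W) := by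
        rw [decide_eq_decide]; omega
      have dr : decide (i = c ∨ i = c + 1 ∨ i + 1 = c) = true := by
        simp only [decide_eq_true_eq]; omega
      have hTT : T (i - 1) = T c := by simp [h2]
      rw [addSp, addSp, d1, d2, d2', d3, dr, hTT]
      cases T c <;> cases (decide (c + 1 ≤ i ∧ i < W) && T i) <;>
        cases (decide (c + 1 ≤ i + 1 ∧ i + 1 < W) && T (i + 1)) <;> rfl
    · by_cases h3 : i + 1 = c
      · have d1 : decide (c ≤ i ∧ i < W) = decide (c + 1 ≤ i ∧ i < W) := by
          rw [decide_eq_decide]; omega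
        have d2 : decide (c ≤ i - 1 ∧ 0 < i) = decide (c + 1 ≤ i - 1 ∧ 0 < i) := by
          rw [decide_eq_decide]; omega
        have d3 : decide (c ≤ i + 1 ∧ i + 1 < W) = true := by
          simp only [decide_eq_true_eq]; omega
        have d3' : decide (c + 1 ≤ i + 1 ∧ i + 1 < W) = false := by
          simp only [decide_eq_false_iff_not]; omega
        have dr : decide (i = c ∨ i = c + 1 ∨ i + 1 = c) = true := by
          simp only [decide_eq_true_eq]; omega
        have hTT : T (i + 1) = T c := by rw [h3]
        rw [addSp, addSp, d1, d2, d3, d3', dr, hTT]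
        cases T c <;> cases (decide (c + 1 ≤ i ∧ i < W) && T i) <;>
          cases (decide (c + 1 ≤ i - 1 ∧ 0 < i) && T (i - 1)) <;> rfl
      · have d1 : decide (c ≤ i ∧ i < W) = decide (c + 1 ≤ i ∧ i < W) := by
          rw [decide_eq_decide]; omega
        have d2 : decide (c ≤ i - 1 ∧ 0 < i) = decide (c + 1 ≤ i - 1 ∧ 0 < i) := by
          rw [decide_eq_decide]; omega
        have d3 : decide (c ≤ i + 1 ∧ i + 1 < W) = decide (c + 1 ≤ i + 1 ∧ i + 1 < W) := by
          rw [decide_eq_decide]; omega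
        have dr : decide (i = c ∨ i = c + 1 ∨ i + 1 = c) = false := by
          simp only [decide_eq_false_iff_not]; omega
        rw [addSp, addSp, d1, d2, d3, dr]
        cases (decide (c + 1 ≤ i ∧ i < W) && T i) <;>
          cases (decide (c + 1 ≤ i - 1 ∧ 0 < i) && T (i - 1)) <;>
          cases (decide (c + 1 ≤ i + 1 ∧ i + 1 < W) && T (i + 1)) <;>
          cases T c <;> rfl

lemma guard_succ (c i : Nat) (T : Nat → Bool) :
    (decide (c ≤ i) && T i) = xor (decide (c + 1 ≤ i) && T i) (decide (i = c) && T c) := by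
  by_cases h : i = c
  · subst h
    have d1 : decide (i ≤ i) = true := by simp
    have d2 : decide (i + 1 ≤ i) = false := by simp
    have d3 : decide (i = i) = true := by simp
    rw [d1, d2, d3]
    cases T i <;> rfl
  · have d1 : decide (c ≤ i) = decide (c + 1 ≤ i) := by rw [decide_eq_decide]; omega
    have d3 : decide (i = c) = false := by simp [h]
    rw [d1, d3]
    cases (decide (c + 1 ≤ i) && T i) <;> rfl

def bodyP (W r : Nat) (T : Nat → Bool) (st : List (List Bool) × Int) (c : Nat) :
    List (List Bool) × Int :=
  if T c then (toggle (c:Int) (r:Int) (W:Int) st.1, st.2 + 1) else st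

lemma hit_row (W c r j i : Nat) (hj : j = r) :
    hitB W c r j i = decide (i = c ∨ i = c + 1 ∨ i + 1 = c) := by
  rw [hitB, decide_eq_decide]; omega

lemma hit_adj (W c r j i : Nat) (hj : j + 1 = r ∨ j = r + 1) :
    hitB W c r j i = decide (i = c) := by
  rw [hitB, decide_eq_decide]; omega

lemma hit_none (W c r j i : Nat) (h1 : j ≠ r) (h2 : ¬(j + 1 = r ∨ j = r + 1)) :
    hitB W c r j i = false := by
  rw [hitB]; simp only [decide_eq_false_iff_not]; omega

lemma loopP (W : Nat) (L : Nat → Nat) (r : Nat) (T : Nat → Bool) (hr : r < W)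
    (hLa : ∀ y < W, W ≤ L y) :
    ∀ (n c : Nat) (g : List (List Bool)) (cnt : Int), c + n = W → Shape g W L →
    Shape ((List.range' c n).foldl (bodyP W r T) (g, cnt)).1 W L ∧
    ((List.range' c n).foldl (bodyP W r T) (g, cnt)).2
      = cnt + ((List.range' c n).countP T : Int) ∧
    (∀ j i, j < W → i < W →
      cell ((List.range' c n).foldl (bodyP W r T) (g, cnt)).1 j i =
        if j = r then xor (cell g j i) (addSp W c T i)
        else if j + 1 = r ∨ j = r + 1 then xor (cell g j i) (decide (c ≤ i) && T i)
        else cell g j i) ∧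
    (∀ j i, W ≤ i ∨ W ≤ j →
      cell ((List.range' c n).foldl (bodyP W r T) (g, cnt)).1 j i = cell g j i) := by
  intro n
  induction n with
  | zero =>
    intro c g cnt hc hg
    simp only [List.range'_zero, List.foldl_nil, List.countP_nil]
    refine ⟨hg, by simp, fun j i hj hi => ?_, fun j i _ => trivial⟩
    have dci : decide (c ≤ i) = false := by simp only [decide_eq_false_iff_not]; omega
    have hsp : addSp W c T i = false := by
      rw [show c = W by omega]; exact addSp_top W T i hi
    rw [hsp, dci]
    split_ifs <;> simp
  | succ n ih =>
    intro c g cnt hc hg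
    have hcW : c < W := by omega
    rw [List.range'_succ, List.foldl_cons, List.countP_cons]
    by_cases hT : T c
    · have hb : bodyP W r T (g, cnt) c = (toggle (c:Int) (r:Int) (W:Int) g, cnt + 1) := by
        simp [bodyP, hT]
      rw [hb]
      have hg' := shape_toggle W L c r g hg hcW hr
      obtain ⟨s1, s2, s3, s4⟩ := ih (c+1) (toggle (c:Int) (r:Int) (W:Int) g) (cnt + 1) (by omega) hg'
      refine ⟨s1, ?_, fun j i hj hi => ?_, fun j i hout => by
        rw [s4 j i hout, cell_toggle_out W L c r j i g hg hLa hcW hr hout]⟩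
      · rw [s2]; simp [hT]; omega
      · rw [s3 j i hj hi, cell_toggle W L c r j i g hg hLa hcW hr hj hi]
        by_cases h1 : j = r
        · rw [if_pos h1, if_pos h1, hit_row W c r j i h1,
            addSp_succ W c T i hcW hi, hT]
          cases cell g j i <;> cases addSp W (c+1) T i <;>
            cases (decide (i = c ∨ i = c + 1 ∨ i + 1 = c)) <;> rfl
        · rw [if_neg h1, if_neg h1]
          by_cases h2 : j + 1 = r ∨ j = r + 1
          · rw [if_pos h2, if_pos h2, hit_adj W c r j i h2, guard_succ c i T, hT]
            cases cell g j i <;> cases (decide (c + 1 ≤ i) && T i) <;>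
              cases (decide (i = c)) <;> rfl
          · rw [if_neg h2, if_neg h2, hit_none W c r j i h1 h2]
            cases cell g j i <;> rfl
    · have hb : bodyP W r T (g, cnt) c = (g, cnt) := by
        simp [bodyP, hT]
      rw [hb]
      obtain ⟨s1, s2, s3, s4⟩ := ih (c+1) g cnt (by omega) hg
      have hTc : T c = false := by simpa using hT
      refine ⟨s1, ?_, fun j i hj hi => ?_, fun j i hout => s4 j i hout⟩
      · rw [s2]; simp [hTc]
      · rw [s3 j i hj hi]
        by_cases h1 : j = r
        · rw [if_pos h1, if_pos h1, addSp_succ W c T i hcW hi, hTc]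
          cases cell g j i <;> cases addSp W (c+1) T i <;>
            cases (decide (i = c ∨ i = c + 1 ∨ i + 1 = c)) <;> rfl
        · rw [if_neg h1, if_neg h1]
          by_cases h2 : j + 1 = r ∨ j = r + 1
          · rw [if_pos h2, if_pos h2, guard_succ c i T, hTc]
            cases cell g j i <;> cases (decide (c + 1 ≤ i) && T i) <;>
              cases (decide (i = c)) <;> rfl
          · rw [if_neg h2, if_neg h2]

lemma loopR (W : Nat) (L : Nat → Nat) (r : Nat) (T : Nat → Bool) (hr1 : 1 ≤ r) (hr : r < W)
    (hLa : ∀ y < W, W ≤ L y) :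
    ∀ (n c : Nat) (g : List (List Bool)) (cnt : Int), c + n = W → Shape g W L →
    (∀ i, c ≤ i → i < W → cell g (r-1) i = T i) →
    (List.range' c n).foldl
        (fun st c => if cell st.1 (r-1) c then (toggle (c:Int) (r:Int) (W:Int) st.1, st.2 + 1) else st)
        (g, cnt)
      = (List.range' c n).foldl (bodyP W r T) (g, cnt) := by
  intro n
  induction n with
  | zero => intro c g cnt _ _ _; rfl
  | succ n ih =>
    intro c g cnt hc hg hread
    have hcW : c < W := by omega
    rw [List.range'_succ, List.foldl_cons, List.foldl_cons]
    have hrd : cell g (r-1) c = T c := hread c (by omega) hcW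
    by_cases hT : T c
    · have e1 : (if cell g (r-1) c then (toggle (c:Int) (r:Int) (W:Int) g, cnt + 1) else (g, cnt))
          = (toggle (c:Int) (r:Int) (W:Int) g, cnt + 1) := by rw [hrd]; simp [hT]
      have e2 : bodyP W r T (g, cnt) c = (toggle (c:Int) (r:Int) (W:Int) g, cnt + 1) := by
        simp [bodyP, hT]
      rw [e1, e2]
      have hg' := shape_toggle W L c r g hg hcW hr
      refine ih (c+1) _ (cnt+1) (by omega) hg' (fun i h1 h2 => ?_)
      rw [cell_toggle W L c r (r-1) i g hg hLa hcW hr (by omega) h2,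
        hit_adj W c r (r-1) i (Or.inl (by omega))]
      have : decide (i = c) = false := by simp only [decide_eq_false_iff_not]; omega
      rw [this]
      rw [Bool.xor_false]
      exact hread i (by omega) h2
    · have hTc : T c = false := by simpa using hT
      have e1 : (if cell g (r-1) c then (toggle (c:Int) (r:Int) (W:Int) g, cnt + 1) else (g, cnt))
          = (g, cnt) := by rw [hrd, hTc]; simp
      have e2 : bodyP W r T (g, cnt) c = (g, cnt) := by simp [bodyP, hTc]
      rw [e1, e2]
      exact ih (c+1) g cnt (by omega) hg (fun i h1 h2 => hread i (by omega) h2)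

def maskb (case : Int) (i : Nat) : Bool := PySem.Int.band case ((1 <<< i : Nat) : Int) != 0

def fcell (field : List (List Bool)) (k i : Nat) : Bool := (field.getD k []).getD i false

def btog (case : Int) (W : Nat) (field : List (List Bool)) : Nat → ((Nat → Bool) × (Nat → Bool))
  | 0 => (fun i => maskb case i, fun _ => false)
  | k+1 =>
    (fun i => xor (xor (xor (xor (fcell field k i) ((btog case W field k).2 i))
        ((btog case W field k).1 i))
        (decide (0 < i) && (btog case W field k).1 (i - 1)))
        (decide (i + 1 < W) && (btog case W field k).1 (i + 1)),
     (btog case W field k).1)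

def cntT (W : Nat) (t : Nat → Bool) : Nat := ((List.range W).map t).count true

def cntM (case : Int) (W : Nat) (field : List (List Bool)) : Nat → Int
  | 0 => 0
  | k+1 => cntM case W field k + (cntT W (btog case W field k).1 : Int)

lemma cntT_eq (W : Nat) (t : Nat → Bool) : cntT W t = (List.range W).countP t := by
  rw [cntT, List.count, List.countP_map]
  congr 1
  funext x
  simp [Function.comp]

lemma addSp_zero (W : Nat) (T : Nat → Bool) (i : Nat) (hi : i < W) :
    addSp W 0 T i = xor (xor (T i) (decide (0 < i) && T (i - 1))) (decide (i + 1 < W) && T (i + 1)) := by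
  have d1 : decide (0 ≤ i ∧ i < W) = true := by simp only [decide_eq_true_eq]; omega
  have d2 : decide (0 ≤ i - 1 ∧ 0 < i) = decide (0 < i) := by rw [decide_eq_decide]; omega
  have d3 : decide (0 ≤ i + 1 ∧ i + 1 < W) = decide (i + 1 < W) := by rw [decide_eq_decide]; omega
  rw [addSp, d1, d2, d3, Bool.true_and]

def Lf (field : List (List Bool)) : Nat → Nat := fun j => (field.getD j []).length

def INVp (case : Int) (W : Nat) (field : List (List Bool)) (r : Nat)
    (st : List (List Bool) × Int) : Prop :=
  Shape st.1 W (Lf field) ∧ st.2 = cntM case W field r ∧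
  (∀ j i, j < W → i < W → cell st.1 j i =
    if j + 1 < r then false
    else if j + 1 = r then (btog case W field r).1 i
    else if j = r then xor (fcell field j i) ((btog case W field r).2 i)
    else fcell field j i) ∧
  (∀ j i, j < W → W ≤ i → cell st.1 j i = fcell field j i)

lemma outer_step (case : Int) (W : Nat) (field : List (List Bool)) (r : Nat)
    (hwide : ∀ y < W, W ≤ Lf field y)
    (hr1 : 1 ≤ r) (hr : r < W) (g : List (List Bool)) (cnt : Int)
    (hinv : INVp case W field r (g, cnt)) :
    INVp case W field (r+1)
      ((List.range W).foldl
        (fun st c => if cell st.1 (r-1) c then (toggle (c:Int) (r:Int) (W:Int) st.1, st.2 + 1) else st)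
        (g, cnt)) := by
  obtain ⟨hg, hcnt, hcell, hhi⟩ := hinv
  dsimp only at hg hcnt hcell hhi
  set T := (btog case W field r).1 with hT
  have hread : ∀ i, 0 ≤ i → i < W → cell g (r-1) i = T i := by
    intro i _ hi
    rw [hcell (r-1) i (by omega) hi, if_neg (by omega), if_pos (by omega)]
  rw [List.range_eq_range', loopR W (Lf field) r T hr1 hr hwide W 0 g cnt (by omega) hg hread]
  obtain ⟨s1, s2, s3, s4⟩ := loopP W (Lf field) r T hr hwide W 0 g cnt (by omega) hg
  refine ⟨s1, ?_, ?_, fun j i hj hi => ?_⟩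
  case refine_3 =>
    rw [s4 j i (Or.inl hi)]
    exact hhi j i hj hi
  · rw [s2, hcnt, ← List.range_eq_range', ← cntT_eq W T]
    simp only [cntM]
    rfl
  · intro j i hj hi
    rw [s3 j i hj hi]
    have d0 : decide ((0:Nat) ≤ i) = true := by simp
    by_cases h1 : j = r
    · rw [if_pos h1, if_neg (by omega), if_pos (by omega),
        hcell j i hj hi, if_neg (by omega), if_neg (by omega), if_pos h1,
        addSp_zero W T i hi]
      simp only [btog, h1]
      rw [← hT]
      cases fcell field r i <;> cases (btog case W field r).2 i <;> cases T i <;>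
        cases (decide (0 < i) && T (i-1)) <;> cases (decide (i+1 < W) && T (i+1)) <;> rfl
    · rw [if_neg h1]
      by_cases h2 : j + 1 = r
      · rw [if_pos (Or.inl h2), if_pos (by omega), hcell j i hj hi,
          if_neg (by omega), if_pos h2, d0, Bool.true_and]
        exact Bool.xor_self _
      · by_cases h3 : j = r + 1
        · rw [if_pos (Or.inr h3), if_neg (by omega), if_neg (by omega), if_pos h3,
            hcell j i hj hi, if_neg (by omega), if_neg (by omega), if_neg h1, d0, Bool.true_and]
          simp only [btog]
          rw [hT]
        · rw [if_neg (by omega), hcell j i hj hi]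
          by_cases h4 : j + 1 < r
          · rw [if_pos h4, if_pos (by omega)]
          · rw [if_neg h4, if_neg h2, if_neg h1, if_neg (by omega), if_neg (by omega), if_neg h3]

lemma first_loop (case : Int) (W : Nat) (field : List (List Bool)) (hW : 1 ≤ W)
    (hwide : ∀ y < W, W ≤ Lf field y)
    (g : List (List Bool)) (hg : Shape g W (Lf field))
    (hc : ∀ j i, j < W → cell g j i = fcell field j i) :
    INVp case W field 1 ((List.range W).foldl (bodyP W 0 (maskb case)) (g, 0)) := by
  obtain ⟨s1, s2, s3, s4⟩ := loopP W (Lf field) 0 (maskb case) (by omega) hwide W 0 g 0 (by omega) hg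
  rw [List.range_eq_range']
  refine ⟨s1, ?_, ?_, fun j i hj hi => ?_⟩
  case refine_3 =>
    rw [s4 j i (Or.inl hi)]
    exact hc j i hj
  · rw [s2, ← List.range_eq_range', ← cntT_eq W (maskb case)]
    simp only [cntM]
    rfl
  · intro j i hj hi
    rw [s3 j i hj hi]
    have d0 : decide ((0:Nat) ≤ i) = true := by simp
    by_cases h1 : j = 0
    · rw [if_pos h1, if_neg (by omega), if_pos (by omega), hc j i hj,
        addSp_zero W (maskb case) i hi]
      subst h1
      simp only [btog]
      cases fcell field 0 i <;> cases maskb case i <;>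
        cases (decide (0 < i) && maskb case (i-1)) <;>
        cases (decide (i+1 < W) && maskb case (i+1)) <;> rfl
    · rw [if_neg h1]
      by_cases h2 : j = 1
      · rw [if_pos (Or.inr h2), if_neg (by omega), if_neg (by omega), if_pos h2,
          hc j i hj, d0, Bool.true_and]
        simp only [btog]
      · rw [if_neg (by omega), hc j i hj, if_neg (by omega), if_neg (by omega),
          if_neg (by omega)]

lemma outer_all (case : Int) (W : Nat) (field : List (List Bool)) (hW : 1 ≤ W)
    (hwide : ∀ y < W, W ≤ Lf field y)
    (st1 : List (List Bool) × Int) (h1 : INVp case W field 1 st1) :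
    ∀ m, m ≤ W - 1 →
    INVp case W field (m+1)
      ((List.range m).foldl
        (fun st k => (List.range W).foldl
          (fun st c => if cell st.1 k c then (toggle (c:Int) ((k+1:Nat):Int) (W:Int) st.1, st.2 + 1) else st)
          st)
        st1) := by
  intro m
  induction m with
  | zero => intro _; simpa using h1
  | succ m ih =>
    intro hm
    rw [List.range_succ, List.foldl_append, List.foldl_cons, List.foldl_nil]
    have hinv := ih (by omega)
    set st := (List.range m).foldl
        (fun st k => (List.range W).foldl
          (fun st c => if cell st.1 k c then (toggle (c:Int) ((k+1:Nat):Int) (W:Int) st.1, st.2 + 1) else st)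
          st)
        st1 with hst
    have := outer_step case W field (m+1) hwide (by omega) (by omega) st.1 st.2 (by simpa using hinv)
    simpa using this

def fuse (W : Nat) (t : Nat → Bool) (row : List Bool) : List Bool :=
  (List.range row.length).map (fun i => if i < W then t i else row.getD i false)

lemma setloop (W : Nat) (d : Nat → Bool) :
    ∀ (n c : Nat) (row : List Bool), c + n = W → W ≤ row.length →
    ((List.range' c n).foldl
        (fun cur i => if d i then PySem.List.pySetD cur (i:Int) (!(PySem.List.pyGetD cur (i:Int) false)) else cur)
        row).length = row.length ∧
    ∀ j, ((List.range' c n).foldl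
        (fun cur i => if d i then PySem.List.pySetD cur (i:Int) (!(PySem.List.pyGetD cur (i:Int) false)) else cur)
        row).getD j false
      = if c ≤ j ∧ j < W ∧ d j then !(row.getD j false) else row.getD j false := by
  intro n
  induction n with
  | zero =>
    intro c row hc hlen
    simp only [List.range'_zero, List.foldl_nil]
    refine ⟨trivial, fun j => ?_⟩
    rw [if_neg (by omega)]
  | succ n ih =>
    intro c row hc hlen
    rw [List.range'_succ, List.foldl_cons]
    have hb : (if d c then PySem.List.pySetD row (c:Int) (!(PySem.List.pyGetD row (c:Int) false)) else row)
        = (if d c then row.set c (!(row.getD c false)) else row) := by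
      rw [PySem.List.pySetD_natCast, PySem.List.pyGetD_natCast]
    rw [hb]
    set row' := if d c then row.set c (!(row.getD c false)) else row with hrow'
    have hlen' : row'.length = row.length := by rw [hrow']; split_ifs <;> simp
    obtain ⟨l1, l2⟩ := ih (c+1) row' (by omega) (by omega)
    refine ⟨by rw [l1, hlen'], fun j => ?_⟩
    rw [l2 j]
    have hgd : row'.getD j false
        = if d c ∧ c = j then !(row.getD j false) else row.getD j false := by
      rw [hrow']
      by_cases hdc : d c
      · rw [if_pos hdc, getD_set_row]
        by_cases hcj : c = j
        · rw [if_pos ⟨hcj, by omega⟩, if_pos ⟨hdc, hcj⟩, hcj]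
        · rw [if_neg (fun h => hcj h.1), if_neg (fun h => hcj h.2)]
      · rw [if_neg hdc, if_neg (fun h => hdc h.1)]
    rw [hgd]
    by_cases hcj : c = j
    · subst hcj
      by_cases hdc : d c
      · rw [if_neg (by omega), if_pos ⟨hdc, rfl⟩, if_pos (by exact ⟨le_refl _, by omega, hdc⟩)]
      · rw [if_neg (by omega), if_neg (show ¬(d c = true ∧ c = c) from fun h => hdc h.1),
          if_neg (show ¬(c ≤ c ∧ c < W ∧ d c = true) from fun h => hdc h.2.2)]
    · have he : (c + 1 ≤ j ∧ j < W ∧ d j) ↔ (c ≤ j ∧ j < W ∧ d j) := by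
        constructor <;> (intro h; exact ⟨by omega, h.2⟩)
      rw [if_neg (show ¬(d c = true ∧ c = j) from fun h => hcj h.2)]
      by_cases hj : c + 1 ≤ j ∧ j < W ∧ d j
      · rw [if_pos hj, if_pos (he.mp hj)]
      · rw [if_neg hj, if_neg (by rw [← he]; exact hj)]

lemma flipval (f c t a b : Bool) :
    (if (xor (xor (xor c t) a) b) then !f else f) = xor (xor (xor (xor f c) t) a) b := by
  cases f <;> cases c <;> cases t <;> cases a <;> cases b <;> rfl

lemma bdelta (case : Int) (W : Nat) (field : List (List Bool)) (m i : Nat) (hi : i < W) :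
    (xor (xor (xor (PySem.List.pyGetD ((List.range W).map (btog case W field m).2) (i:Int) false)
          (PySem.List.pyGetD ((List.range W).map (btog case W field m).1) (i:Int) false))
        (decide (0 < (i:Int)) && PySem.List.pyGetD ((List.range W).map (btog case W field m).1) ((i:Int) - 1) false))
      (decide ((i:Int) + 1 < (W:Int)) && PySem.List.pyGetD ((List.range W).map (btog case W field m).1) ((i:Int) + 1) false))
    = (xor (xor (xor ((btog case W field m).2 i) ((btog case W field m).1 i))
        (decide (0 < i) && (btog case W field m).1 (i - 1)))
      (decide (i + 1 < W) && (btog case W field m).1 (i + 1))) := by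
  have e2 : PySem.List.pyGetD ((List.range W).map (btog case W field m).2) (i:Int) false
      = (btog case W field m).2 i := by
    rw [PySem.List.pyGetD_natCast, PySem.List.getD_map_range _ W i false hi]
  have e3 : PySem.List.pyGetD ((List.range W).map (btog case W field m).1) (i:Int) false
      = (btog case W field m).1 i := by
    rw [PySem.List.pyGetD_natCast, PySem.List.getD_map_range _ W i false hi]
  have e4 : (decide (0 < (i:Int)) && PySem.List.pyGetD ((List.range W).map (btog case W field m).1) ((i:Int) - 1) false)
      = (decide (0 < i) && (btog case W field m).1 (i - 1)) := by
    by_cases h0 : 0 < i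
    · have c1 : ((i:Int) - 1) = ((i - 1 : Nat) : Int) := by omega
      have c2 : decide (0 < (i:Int)) = true := by simp only [decide_eq_true_eq]; omega
      have c3 : decide (0 < i) = true := by simp only [decide_eq_true_eq]; omega
      rw [c1, c2, c3, PySem.List.pyGetD_natCast,
        PySem.List.getD_map_range _ W (i-1) false (by omega)]
    · have hz : i = 0 := by omega
      subst hz
      rfl
  have e5 : (decide ((i:Int) + 1 < (W:Int)) && PySem.List.pyGetD ((List.range W).map (btog case W field m).1) ((i:Int) + 1) false)
      = (decide (i + 1 < W) && (btog case W field m).1 (i + 1)) := by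
    have c1 : decide ((i:Int) + 1 < (W:Int)) = decide (i + 1 < W) := by
      rw [decide_eq_decide]; omega
    by_cases h0 : i + 1 < W
    · have c2 : ((i:Int) + 1) = ((i + 1 : Nat) : Int) := by omega
      rw [c1, c2, PySem.List.pyGetD_natCast, PySem.List.getD_map_range _ W (i+1) false h0]
    · have c3 : decide (i + 1 < W) = false := by simp only [decide_eq_false_iff_not]; omega
      rw [c1, c3, Bool.false_and, Bool.false_and]
  rw [e2, e3, e4, e5]

def curval (case : Int) (W : Nat) (field : List (List Bool)) : Nat → List Bool
  | 0 => []
  | k+1 => fuse W (btog case W field (k+1)).1 (field.getD k [])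

lemma bfold (case : Int) (W : Nat) (field : List (List Bool))
    (hwide : ∀ y < W, W ≤ Lf field y) :
    ∀ m, m ≤ W →
    (List.range m).foldl
      (fun (st : Int × List Bool × List Bool × List Bool) (r : Nat) =>
        (st.1 + (st.2.1.count true : Int),
         (List.range W).map (fun i : Nat =>
            PySem.List.pyGetD
              ((List.range W).foldl
                (fun cur (j : Nat) =>
                  if (xor (xor (xor (PySem.List.pyGetD st.2.2.1 (j:Int) false)
                        (PySem.List.pyGetD st.2.1 (j:Int) false))
                      (decide (0 < (j:Int)) && PySem.List.pyGetD st.2.1 ((j:Int) - 1) false))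
                    (decide ((j:Int) + 1 < (W:Int)) && PySem.List.pyGetD st.2.1 ((j:Int) + 1) false))
                  then PySem.List.pySetD cur (j:Int) (!(PySem.List.pyGetD cur (j:Int) false)) else cur)
                (PySem.List.pyGetD field (r:Int) []))
              (i:Int) false),
         st.2.1,
         (List.range W).foldl
            (fun cur (j : Nat) =>
              if (xor (xor (xor (PySem.List.pyGetD st.2.2.1 (j:Int) false)
                    (PySem.List.pyGetD st.2.1 (j:Int) false))
                  (decide (0 < (j:Int)) && PySem.List.pyGetD st.2.1 ((j:Int) - 1) false))
                (decide ((j:Int) + 1 < (W:Int)) && PySem.List.pyGetD st.2.1 ((j:Int) + 1) false))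
              then PySem.List.pySetD cur (j:Int) (!(PySem.List.pyGetD cur (j:Int) false)) else cur)
            (PySem.List.pyGetD field (r:Int) [])))
      (0, (List.range W).map (fun i => PySem.Int.band case ((1 <<< i : Nat) : Int) != 0),
        List.replicate W false, ([] : List Bool))
    = (cntM case W field m, (List.range W).map (btog case W field m).1,
       (List.range W).map (btog case W field m).2, curval case W field m) := by
  intro m
  induction m with
  | zero =>
    intro _
    simp only [List.range_zero, List.foldl_nil, curval]
    have h2 : (List.range W).map (btog case W field 0).2 = List.replicate W false := by
      simp [btog, List.map_const']
    rw [h2]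
    rfl
  | succ m ih =>
    intro hm
    rw [List.range_succ, List.foldl_append, List.foldl_cons, List.foldl_nil, ih (by omega)]
    dsimp only
    have hrowlen : W ≤ (field.getD m []).length := hwide m (by omega)
    set T1 := (btog case W field m).1 with hT1
    set T2 := (btog case W field m).2 with hT2
    set dm : Nat → Bool := fun j =>
      (xor (xor (xor (T2 j) (T1 j)) (decide (0 < j) && T1 (j-1)))
        (decide (j+1 < W) && T1 (j+1))) with hdm
    have hconv : (List.range W).foldl
        (fun cur (j : Nat) =>
          if (xor (xor (xor (PySem.List.pyGetD ((List.range W).map T2) (j:Int) false)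
                (PySem.List.pyGetD ((List.range W).map T1) (j:Int) false))
              (decide (0 < (j:Int)) && PySem.List.pyGetD ((List.range W).map T1) ((j:Int) - 1) false))
            (decide ((j:Int) + 1 < (W:Int)) && PySem.List.pyGetD ((List.range W).map T1) ((j:Int) + 1) false))
          then PySem.List.pySetD cur (j:Int) (!(PySem.List.pyGetD cur (j:Int) false)) else cur)
        (PySem.List.pyGetD field (m:Int) [])
        = (List.range' 0 W).foldl
          (fun cur (j : Nat) => if dm j then PySem.List.pySetD cur (j:Int) (!(PySem.List.pyGetD cur (j:Int) false)) else cur)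
          (field.getD m []) := by
      rw [← List.range_eq_range', PySem.List.pyGetD_natCast]
      refine PySem.List.foldl_congr_mem _ _ _ _ (fun cur j hj => ?_)
      rw [hdm]
      rw [bdelta case W field m j (List.mem_range.mp hj)]
    obtain ⟨l1, l2⟩ := setloop W dm W 0 (field.getD m []) (by omega) hrowlen
    have hval : ∀ i, i < W →
        ((List.range' 0 W).foldl
          (fun cur (j : Nat) => if dm j then PySem.List.pySetD cur (j:Int) (!(PySem.List.pyGetD cur (j:Int) false)) else cur)
          (field.getD m [])).getD i false = (btog case W field (m+1)).1 i := by
      intro i hi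
      have hcond : (0 ≤ i ∧ i < W ∧ dm i = true) ↔ (dm i = true) :=
        ⟨fun h => h.2.2, fun h => ⟨Nat.zero_le _, hi, h⟩⟩
      rw [l2 i, if_congr hcond rfl rfl]
      have hf : (field.getD m []).getD i false = fcell field m i := rfl
      rw [hf]
      simp only [hdm]
      rw [flipval (fcell field m i) (T2 i) (T1 i) (decide (0 < i) && T1 (i-1)) (decide (i+1 < W) && T1 (i+1))]
      simp only [btog, ← hT1, ← hT2]
    have hcur : (List.range' 0 W).foldl
        (fun cur (j : Nat) => if dm j then PySem.List.pySetD cur (j:Int) (!(PySem.List.pyGetD cur (j:Int) false)) else cur)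
        (field.getD m []) = curval case W field (m+1) := by
      simp only [curval, fuse]
      refine List.ext_getElem (by rw [l1]; simp) (fun i h1 h2 => ?_)
      have hilen : i < (field.getD m []).length := by
        have := l1; omega
      rw [← List.getD_eq_getElem _ false h1]
      have hrhs : ((List.range (field.getD m []).length).map
          (fun i => if i < W then (btog case W field (m+1)).1 i else (field.getD m []).getD i false))[i]
          = (if i < W then (btog case W field (m+1)).1 i else (field.getD m []).getD i false) := by
        simp
      rw [hrhs]
      by_cases hiW : i < W
      · rw [if_pos hiW, hval i hiW]
      · rw [if_neg hiW, l2 i, if_neg (by omega)]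
    rw [hconv, hcur]
    refine Prod.ext rfl (Prod.ext ?_ rfl)
    dsimp only
    refine List.map_congr_left (fun i hmem => ?_)
    have hiW := List.mem_range.mp hmem
    rw [PySem.List.pyGetD_natCast]
    simp only [curval, fuse]
    rw [List.getD_eq_getElem _ false (by rw [List.length_map, List.length_range]; omega)]
    simp [hiW]

lemma checkB_eq (case : Int) (W : Nat) (field : List (List Bool)) (hW : 1 ≤ W)
    (hwide : ∀ y < W, W ≤ Lf field y) :
    check_alt case (W:Int) field
      = (if (curval case W field W).any id then 401 else cntM case W field W) := by
  simp only [check_alt, PySem.List.pyRange_zero_nat, List.map_map, List.foldl_map,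
    Function.comp_def, Int.toNat_natCast]
  rw [bfold case W field hwide W (le_refl W)]

lemma checkA_eq (case : Int) (W : Nat) (field : List (List Bool)) (hW : 1 ≤ W)
    (hlen : W ≤ field.length) (hwide : ∀ y < W, W ≤ Lf field y) :
    check case (W:Int) field
      = (if (curval case W field W).any id then 401 else cntM case W field W) := by
  have hnf : (PySem.List.pyRange 0 (W:Int) 1).map
      (fun seq => PySem.List.slice (PySem.List.pyGetD field seq []) none none)
      = (List.range W).map (fun s => field.getD s []) := by
    rw [PySem.List.pyRange_zero_nat W, List.map_map]
    refine List.map_congr_left fun s _ => ?_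
    simp [PySem.List.slice_none_none, PySem.List.pyGetD_natCast, Function.comp]
  have hShape : Shape ((List.range W).map (fun s => field.getD s [])) W (Lf field) := by
    refine ⟨by simp, fun j hj => ?_⟩
    rw [PySem.List.getD_map_range _ W j [] hj]
    rfl
  have hcell0 : ∀ j i, j < W →
      cell ((List.range W).map (fun s => field.getD s [])) j i = fcell field j i := by
    intro j i hj
    rw [cell, PySem.List.getD_map_range _ W j [] hj]
    rfl
  have hfold1 : ∀ g0 : List (List Bool),
      (PySem.List.pyRange 0 (W:Int) 1).foldl
        (fun (st : List (List Bool) × Int) i =>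
          if PySem.Int.band case (1 <<< i.toNat) ≠ 0 then (toggle i 0 (W:Int) st.1, st.2 + 1) else st)
        (g0, 0)
      = (List.range W).foldl (bodyP W 0 (maskb case)) (g0, 0) := by
    intro g0
    rw [PySem.List.pyRange_zero_nat W, List.foldl_map]
    refine PySem.List.foldl_congr_mem _ _ _ _ (fun st c _ => ?_)
    rw [bodyP, Int.toNat_natCast]
    by_cases h : PySem.Int.band case ((1 <<< c : Nat) : Int) ≠ 0
    · rw [if_pos h, if_pos (by simpa [maskb, bne_iff_ne] using h)]
      rfl
    · rw [if_neg h, if_neg (by simpa [maskb, bne_iff_ne] using h)]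
  have hfold2 : ∀ st : List (List Bool) × Int,
      (PySem.List.pyRange 1 (W:Int) 1).foldl
        (fun st row => (PySem.List.pyRange 0 (W:Int) 1).foldl
          (fun (st : List (List Bool) × Int) col =>
            if PySem.List.pyGetD (PySem.List.pyGetD st.1 (row - 1) []) col false then
              (toggle col row (W:Int) st.1, st.2 + 1)
            else st)
          st)
        st
      = (List.range (W-1)).foldl
          (fun st k => (List.range W).foldl
            (fun st c => if cell st.1 k c then (toggle (c:Int) ((k+1:Nat):Int) (W:Int) st.1, st.2 + 1) else st)
            st)
          st := by
    intro st
    rw [PySem.List.pyRange_one 1 (W:Int), show ((W:Int) - 1).toNat = W - 1 by omega,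
      List.foldl_map]
    refine PySem.List.foldl_congr_mem _ _ _ _ (fun st2 k _ => ?_)
    rw [PySem.List.pyRange_zero_nat W, List.foldl_map]
    refine PySem.List.foldl_congr_mem _ _ _ _ (fun st3 c _ => ?_)
    have er1 : (1 + (k:Int) - 1) = ((k:Nat):Int) := by omega
    have er : (1 + (k:Int)) = ((k+1:Nat):Int) := by omega
    rw [er1, er, PySem.List.pyGetD_natCast, PySem.List.pyGetD_natCast]
    rfl
  have hmain := outer_all case W field hW hwide _
    (first_loop case W field hW hwide _ hShape hcell0) (W-1) (le_refl _)
  rw [show W - 1 + 1 = W from by omega] at hmain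
  simp only [check]
  rw [hnf, hfold1, hfold2]
  set stf := (List.range (W-1)).foldl
      (fun st k => (List.range W).foldl
        (fun st c => if cell st.1 k c then (toggle (c:Int) ((k+1:Nat):Int) (W:Int) st.1, st.2 + 1) else st)
        st)
      ((List.range W).foldl (bodyP W 0 (maskb case)) ((List.range W).map (fun s => field.getD s []), 0))
    with hstf
  obtain ⟨hs, hc2, hc3, hc4⟩ := hmain
  have hl : stf.1.length = W := hs.1
  have hrl : (stf.1.getD (W-1) []).length = (field.getD (W-1) []).length := hs.2 (W-1) (by omega)
  have hcv : curval case W field W = fuse W (btog case W field W).1 (field.getD (W-1) []) := by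
    obtain ⟨w', hw'⟩ : ∃ w', W = w' + 1 := ⟨W - 1, by omega⟩
    rw [show W - 1 = w' from by omega]
    conv_lhs => rw [hw']
    rw [curval, ← hw']
  have hrowlist : stf.1.getD (W-1) [] = curval case W field W := by
    rw [hcv, fuse]
    refine List.ext_getElem (by rw [hrl]; simp) (fun i h1 h2 => ?_)
    have hilen : i < (field.getD (W-1) []).length := by omega
    have eL : (stf.1.getD (W-1) [])[i] = cell stf.1 (W-1) i := by
      rw [cell, List.getD_eq_getElem _ false (by omega)]
    rw [eL]
    have eR : ((List.range (field.getD (W-1) []).length).map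
        (fun i => if i < W then (btog case W field W).1 i else (field.getD (W-1) []).getD i false))[i]
        = (if i < W then (btog case W field W).1 i else (field.getD (W-1) []).getD i false) := by
      simp
    rw [eR]
    by_cases hiW : i < W
    · rw [if_pos hiW, hc3 (W-1) i (by omega) hiW, if_neg (by omega), if_pos (by omega)]
    · rw [if_neg hiW, hc4 (W-1) i (by omega) (by omega)]
      rfl
  have hrow : PySem.List.pyGetD stf.1 (-1) [] = curval case W field W := by
    rw [PySem.List.pyGetD_neg_ofNat stf.1 1 [] (by omega) (by omega)]
    rw [show stf.1[stf.1.length - 1] = stf.1.getD (W-1) [] from by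
      rw [List.getD_eq_getElem _ _ (by omega)]; exact getElem_congr rfl (by omega) _]
    exact hrowlist
  rw [hrow, hc2]

theorem check_eq_alt (case width : Int) (field : List (List Bool))
    (hpre : Pre_check case width field) :
    check case width field = check_alt case width field := by
  obtain ⟨h1, h2, h3⟩ := hpre
  set W := width.toNat with hWdefEq
  have hwc : (W:Int) = width := by omega
  have hW : 1 ≤ W := by omega
  have hlen : W ≤ field.length := by omega
  have hwide : ∀ y < W, W ≤ Lf field y := by
    intro j hj
    have hjl : j < field.length := by omega
    have hget : field.getD j [] = field[j] := List.getD_eq_getElem _ _ hjl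
    have hmem : field[j] ∈ field.take W := by
      have htl : j < (field.take W).length := by simp; omega
      have : (field.take W)[j] = field[j] := List.getElem_take
      rw [← this]
      exact List.getElem_mem htl
    have := h3 field[j] hmem
    show W ≤ (field.getD j []).length
    rw [hget]
    omega
  rw [← hwc, checkA_eq case W field hW hlen hwide, checkB_eq case W field hW hwide]

-- ===== VERDICT (by name: the statement is the Claim_ definition above) =====
theorem check_spec : Claim_equal_check := by
  intro case width field _ hpre
  unfold Spec_check
  exact check_eq_alt case width field hpre
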